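-- pv_equiv track=rewrite | github.com/ttowayo/pxtovw | update_banners.py | replace_banner
-- ===== SOURCE A (Python) =====
-- def replace_banner(content, banner_class, replacement):
--     # This regex looks for `<div class="ad-banner left">` or `right` and matches until the corresponding closing `</div>`
--     # Because HTML can be deeply nested, regex is tricky. We'll use a simple parser.
--     start_tag = f'<div class="{banner_class}">'
--     start_idx = content.find(start_tag)
--     if start_idx == -1:
--         return content # Not found
--
--     # We need to find the matching closing div
--     open_divs = 0
--     end_idx = -1
--     i = start_idx
--     while i < len(content):
--         if content[i:i+4] == '<div':
--             open_divs += 1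
--         elif content[i:i+6] == '</div>':
--             open_divs -= 1
--             if open_divs == 0:
--                 end_idx = i + 6
--                 break
--         i += 1
--
--     if end_idx != -1:
--         return content[:start_idx] + replacement + content[end_idx:]
--     return content
-- ===== SOURCE B (Python) =====
-- def _find_end(content, pos):
--     # Jump between tag occurrences with str.find instead of scanning every
--     # character, keeping a div-nesting depth; return the index just past the
--     # matching '</div>', or None if the divs never balance.
--     depth = 0
--     while True:
--         o = content.find('<div', pos)
--         c = content.find('</div>', pos)
--         if c == -1:
--             return None
--         if o != -1 and o < c:
--             depth += 1
--             pos = o + 4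
--         else:
--             depth -= 1
--             if depth == 0:
--                 return c + 6
--             pos = c + 6
--
--
-- def replace_banner(content, banner_class, replacement):
--     start_idx = content.find(f'<div class="{banner_class}">')
--     if start_idx == -1:
--         return content
--     end_idx = _find_end(content, start_idx)
--     if end_idx is None:
--         return content
--     return content[:start_idx] + replacement + content[end_idx:]
-- ===== Notes on version B (the rewrite author's own statement) =====
-- stated objective: alternative
-- what changed: A scans every character from the start tag comparing 4- and 6-char slices at each index; B jumps straight from tag occurrence to tag occurrence with str.find('<div', pos) / str.find('</div>', pos), updating the depth counter once per tag instead of once per character.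
import Mathlib
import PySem

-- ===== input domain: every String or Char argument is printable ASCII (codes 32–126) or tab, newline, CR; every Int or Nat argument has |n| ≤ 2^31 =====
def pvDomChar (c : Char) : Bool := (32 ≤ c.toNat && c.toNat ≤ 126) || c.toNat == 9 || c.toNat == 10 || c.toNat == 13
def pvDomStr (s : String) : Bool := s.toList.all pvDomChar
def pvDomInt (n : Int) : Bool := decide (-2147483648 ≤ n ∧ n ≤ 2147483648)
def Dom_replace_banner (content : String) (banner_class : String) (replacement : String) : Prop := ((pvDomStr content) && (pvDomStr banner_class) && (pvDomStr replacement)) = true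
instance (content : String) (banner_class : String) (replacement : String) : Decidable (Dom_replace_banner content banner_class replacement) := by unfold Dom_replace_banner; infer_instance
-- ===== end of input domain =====

-- B replaces A's per-character depth scan by str.find jumps from tag occurrence to tag occurrence (alternative algorithm, same return value, proved below).

-- ===== PORT A =====
-- A's while loop: i walks every index; content[i:i+4] / content[i:i+6] slice
-- comparisons, open_divs depth counter, break with end_idx = i + 6 ↦ some (i+6).
def replace_banner_scan (cs : List Char) (i : Nat) (openDivs : Int) : Option Nat :=
  if h : i < cs.length then
    if PySem.List.slice cs (some (i : Int)) (some ((i + 4 : Nat) : Int)) = "<div".toList then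
      replace_banner_scan cs (i + 1) (openDivs + 1)
    else if PySem.List.slice cs (some (i : Int)) (some ((i + 6 : Nat) : Int)) = "</div>".toList then
      if openDivs - 1 = 0 then some (i + 6)
      else replace_banner_scan cs (i + 1) (openDivs - 1)
    else replace_banner_scan cs (i + 1) openDivs
  else none
termination_by cs.length - i

def replace_banner (content : String) (banner_class : String) (replacement : String) : String :=
  let startTag : List Char := "<div class=\"".toList ++ banner_class.toList ++ "\">".toList
  let cs := content.toList
  let startIdx := PySem.Chars.find cs startTag
  if startIdx = -1 then content
  else
    -- start_idx ≥ 0 here, so .toNat is exact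
    match replace_banner_scan cs startIdx.toNat 0 with
    | some endIdx =>
        String.ofList (PySem.List.slice cs none (some startIdx) ++ replacement.toList ++
                   PySem.List.slice cs (some (endIdx : Int)) none)
    | none => content

-- ===== PORT B =====
-- facts about findFrom used by bLoop's recursion guards (termination / bound bookkeeping)
theorem findFrom_facts (cs sub : List Char) (pos : Nat) (hpos : pos ≤ cs.length)
    (h : PySem.Chars.findFrom cs sub (pos : Int) ≠ -1) :
    pos ≤ (PySem.Chars.findFrom cs sub (pos : Int)).toNat ∧
    (PySem.Chars.findFrom cs sub (pos : Int)).toNat + sub.length ≤ cs.length ∧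
    sub <+: cs.drop (PySem.Chars.findFrom cs sub (pos : Int)).toNat ∧
    (∀ i : Nat, pos ≤ i → i < (PySem.Chars.findFrom cs sub (pos : Int)).toNat →
      ¬ sub <+: cs.drop i) := by
  obtain ⟨h1, h2, h3⟩ := PySem.Chars.findFrom_natCast_spec cs sub pos hpos h
  have hlen := h2.length_le
  rw [List.length_drop] at hlen
  have he := PySem.Chars.findFrom_natCast cs sub pos hpos
  have hf := PySem.Chars.find_le_length (cs.drop pos) sub
  rw [List.length_drop] at hf
  rw [if_neg (by intro hx; rw [hx, if_pos rfl] at he; exact h he)] at he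
  have : (PySem.Chars.findFrom cs sub (pos : Int)).toNat ≤ cs.length := by omega
  exact ⟨by omega, by omega, h2, h3⟩

-- B's loop: jump with content.find('<div', pos) / content.find('</div>', pos),
-- keep the depth counter, return the end index (None ↦ none).
def replace_banner_jump (cs : List Char) (depth : Int) (pos : Nat) (hpos : pos ≤ cs.length) : Option Nat :=
  if hc : PySem.Chars.findFrom cs "</div>".toList (pos : Int) = -1 then none
  else if ho : PySem.Chars.findFrom cs "<div".toList (pos : Int) ≠ -1 ∧
      PySem.Chars.findFrom cs "<div".toList (pos : Int) <
        PySem.Chars.findFrom cs "</div>".toList (pos : Int) then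
    replace_banner_jump cs (depth + 1) ((PySem.Chars.findFrom cs "<div".toList (pos : Int)).toNat + 4)
      (by have := findFrom_facts cs "<div".toList pos hpos ho.1; simpa using this.2.1)
  else if depth - 1 = 0 then some ((PySem.Chars.findFrom cs "</div>".toList (pos : Int)).toNat + 6)
  else replace_banner_jump cs (depth - 1) ((PySem.Chars.findFrom cs "</div>".toList (pos : Int)).toNat + 6)
    (by have := findFrom_facts cs "</div>".toList pos hpos hc; simpa using this.2.1)
termination_by cs.length + 1 - pos
decreasing_by
  · have := findFrom_facts cs "<div".toList pos hpos ho.1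
    omega
  · have := findFrom_facts cs "</div>".toList pos hpos hc
    omega

def replace_banner_alt (content : String) (banner_class : String) (replacement : String) : String :=
  let startTag : List Char := "<div class=\"".toList ++ banner_class.toList ++ "\">".toList
  let cs := content.toList
  let startIdx := PySem.Chars.find cs startTag
  if h : startIdx = -1 then content
  else
    match replace_banner_jump cs 0 startIdx.toNat
        (by have h1 := PySem.Chars.find_le_length cs startTag; omega) with
    | some endIdx =>
        String.ofList (PySem.List.slice cs none (some startIdx) ++ replacement.toList ++
                   PySem.List.slice cs (some (endIdx : Int)) none)
    | none => content

-- ===== PRECONDITION & SPEC =====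
def Spec_replace_banner (content : String) (banner_class : String) (replacement : String) (out : String) : Prop := out = replace_banner_alt content banner_class replacement
instance (content : String) (banner_class : String) (replacement : String) (out : String) : Decidable (Spec_replace_banner content banner_class replacement out) := by unfold Spec_replace_banner; infer_instance

-- ===== CLAIM (what is proved, stated in full; the proofs are below) =====
def Claim_equal_replace_banner : Prop := ∀ (content : String) (banner_class : String) (replacement : String), Dom_replace_banner content banner_class replacement → Spec_replace_banner content banner_class replacement (replace_banner content banner_class replacement)

-- ===== LEMMAS AND PROOFS =====

-- A's slice comparison at i is exactly "pattern is a prefix of cs.drop i"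
theorem slice_eq_pat_iff (cs pat : List Char) (i n : Nat) (hn : pat.length = n) :
    (PySem.List.slice cs (some (i : Int)) (some ((i + n : Nat) : Int)) = pat) ↔ pat <+: cs.drop i := by
  rw [PySem.List.slice_natCast]
  have h' : i + n - i = n := by omega
  rw [h', List.prefix_iff_eq_take, hn]
  exact eq_comm

-- a position holding a char other than '<' starts neither tag
theorem no_tag_of_ne (cs : List Char) (i : Nat) (ch : Char) (h : cs[i]? = some ch) (hne : ch ≠ '<') :
    ¬ ("<div".toList <+: cs.drop i) ∧ ¬ ("</div>".toList <+: cs.drop i) := by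
  constructor <;> intro hp <;> obtain ⟨t, ht⟩ := hp <;>
    · have hh := congrArg List.head? ht
      simp [List.head?_drop] at hh
      rw [h] at hh
      exact hne (by injection hh with hv; exact hv.symm)

-- no prefix occurrence at j ≥ pos when the pattern is not an infix of cs.drop pos
theorem no_prefix_of_not_infix (cs sub : List Char) (pos j : Nat) (hj : pos ≤ j)
    (h : ¬ sub <:+: cs.drop pos) : ¬ sub <+: cs.drop j := by
  intro hp
  apply h
  have hd : cs.drop j = (cs.drop pos).drop (j - pos) := by
    rw [List.drop_drop]; congr 1; omega
  rw [hd] at hp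
  obtain ⟨u, hu⟩ := hp
  exact ⟨(cs.drop pos).take (j - pos), u, by
    rw [List.append_assoc, hu, List.take_append_drop]⟩

-- A's scan returns none when no '</div>' occurs at or after pos
theorem scan_none (cs : List Char) : ∀ (n pos : Nat) (d : Int), cs.length - pos ≤ n →
    (∀ j : Nat, pos ≤ j → ¬ ("</div>".toList <+: cs.drop j)) →
    replace_banner_scan cs pos d = none := by
  intro n
  induction n with
  | zero =>
    intro pos d hn _
    rw [replace_banner_scan, dif_neg (by omega)]
  | succ n ih =>
    intro pos d hn hno
    by_cases hl : pos < cs.length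
    · rw [replace_banner_scan, dif_pos hl]
      split_ifs with c1 c2 c3
      · exact ih (pos + 1) (d + 1) (by omega) (fun j hj => hno j (by omega))
      · exact absurd ((slice_eq_pat_iff cs _ pos 6 rfl).mp c2) (hno pos le_rfl)
      · exact absurd ((slice_eq_pat_iff cs _ pos 6 rfl).mp c2) (hno pos le_rfl)
      · exact ih (pos + 1) d (by omega) (fun j hj => hno j (by omega))
    · rw [replace_banner_scan, dif_neg hl]

-- A's scan skips tag-free stretches unchanged
theorem scan_skip (cs : List Char) : ∀ (n pos q : Nat) (d : Int), q - pos ≤ n → pos ≤ q →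
    q ≤ cs.length →
    (∀ i : Nat, pos ≤ i → i < q →
      ¬ ("<div".toList <+: cs.drop i) ∧ ¬ ("</div>".toList <+: cs.drop i)) →
    replace_banner_scan cs pos d = replace_banner_scan cs q d := by
  intro n
  induction n with
  | zero =>
    intro pos q d h1 h2 _ _
    have he : pos = q := by omega
    rw [he]
  | succ n ih =>
    intro pos q d h1 h2 hq hfree
    by_cases he : pos = q
    · rw [he]
    · have hl : pos < cs.length := by omega
      have hi := hfree pos le_rfl (by omega)
      rw [replace_banner_scan, dif_pos hl,
          if_neg (fun hc => hi.1 ((slice_eq_pat_iff cs _ pos 4 rfl).mp hc)),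
          if_neg (fun hc => hi.2 ((slice_eq_pat_iff cs _ pos 6 rfl).mp hc))]
      exact ih (pos + 1) q d (by omega) (by omega) hq (fun i ha hb => hfree i (by omega) hb)

-- reading one character through a known decomposition of cs.drop p
theorem char_at (cs : List Char) (p k : Nat) (l : List Char) (hd : cs.drop p = l) :
    cs[p + k]? = l[k]? := by
  rw [← List.getElem?_drop, hd]

-- both loops return none / stop at the end of the string
theorem loop_eq_end (cs : List Char) (pos : Nat) (hpos : pos ≤ cs.length) (d : Int)
    (hend : cs.length ≤ pos) :
    replace_banner_scan cs pos d = replace_banner_jump cs d pos hpos := by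
  have hpl : pos = cs.length := by omega
  subst hpl
  rw [replace_banner_scan, dif_neg (by omega), replace_banner_jump, dif_pos
    (by rw [PySem.Chars.findFrom_natCast_eq_neg_one_iff cs _ cs.length le_rfl]
        simp [List.drop_length])]

-- the two loops agree
theorem loop_eq (cs : List Char) : ∀ (n pos : Nat) (hpos : pos ≤ cs.length) (d : Int),
    cs.length - pos ≤ n → replace_banner_scan cs pos d = replace_banner_jump cs d pos hpos := by
  intro n
  induction n with
  | zero =>
    intro pos hpos d hn
    exact loop_eq_end cs pos hpos d (by omega)
  | succ n ih =>
    intro pos hpos d hn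
    by_cases hterm : cs.length ≤ pos
    · exact loop_eq_end cs pos hpos d hterm
    · have hl : pos < cs.length := by omega
      by_cases hc : PySem.Chars.findFrom cs "</div>".toList (pos : Int) = -1
      · rw [replace_banner_jump, dif_pos hc]
        exact scan_none cs cs.length pos d (by omega) (fun j hj =>
          no_prefix_of_not_infix cs _ pos j hj
            ((PySem.Chars.findFrom_natCast_eq_neg_one_iff cs _ pos hpos).mp hc))
      · obtain ⟨hc1, hc2, hc3, hc4⟩ := findFrom_facts cs "</div>".toList pos hpos hc
        have hspc := (PySem.Chars.findFrom_natCast_spec cs "</div>".toList pos hpos hc).1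
        have hc6 : (PySem.Chars.findFrom cs "</div>".toList (pos : Int)).toNat + 6 ≤ cs.length := by
          simpa using hc2
        by_cases ho : PySem.Chars.findFrom cs "<div".toList (pos : Int) ≠ -1 ∧
            PySem.Chars.findFrom cs "<div".toList (pos : Int) <
              PySem.Chars.findFrom cs "</div>".toList (pos : Int)
        · -- the next tag is an opening '<div'
          rw [replace_banner_jump, dif_neg hc, dif_pos ho]
          obtain ⟨ho1, ho2, ho3, ho4⟩ := findFrom_facts cs "<div".toList pos hpos ho.1
          have hspo := (PySem.Chars.findFrom_natCast_spec cs "<div".toList pos hpos ho.1).1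
          have ho4' : (PySem.Chars.findFrom cs "<div".toList (pos : Int)).toNat + 4 ≤ cs.length := by
            simpa using ho2
          have hoc : (PySem.Chars.findFrom cs "<div".toList (pos : Int)).toNat <
              (PySem.Chars.findFrom cs "</div>".toList (pos : Int)).toNat := by
            have := ho.2; omega
          rw [scan_skip cs (PySem.Chars.findFrom cs "<div".toList (pos : Int)).toNat pos
              (PySem.Chars.findFrom cs "<div".toList (pos : Int)).toNat d (by omega) ho1 (by omega)
              (fun i ha hb => ⟨ho4 i ha hb, hc4 i ha (by omega)⟩)]
          rw [replace_banner_scan, dif_pos (by omega), if_pos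
              ((slice_eq_pat_iff cs _ _ 4 rfl).mpr ho3)]
          obtain ⟨t, ht⟩ := ho3
          have hdrop : cs.drop (PySem.Chars.findFrom cs "<div".toList (pos : Int)).toNat =
              '<' :: 'd' :: 'i' :: 'v' :: t := by rw [← ht]; rfl
          rw [scan_skip cs 3 ((PySem.Chars.findFrom cs "<div".toList (pos : Int)).toNat + 1)
              ((PySem.Chars.findFrom cs "<div".toList (pos : Int)).toNat + 4) (d + 1)
              (by omega) (by omega) (by omega) ?_]
          · exact ih ((PySem.Chars.findFrom cs "<div".toList (pos : Int)).toNat + 4)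
              (by omega) (d + 1) (by omega)
          · intro i ha hb
            have hval := char_at cs (PySem.Chars.findFrom cs "<div".toList (pos : Int)).toNat
              (i - (PySem.Chars.findFrom cs "<div".toList (pos : Int)).toNat) _ hdrop
            rw [show (PySem.Chars.findFrom cs "<div".toList (pos : Int)).toNat +
                (i - (PySem.Chars.findFrom cs "<div".toList (pos : Int)).toNat) = i by omega] at hval
            have hcase : i - (PySem.Chars.findFrom cs "<div".toList (pos : Int)).toNat = 1 ∨
                i - (PySem.Chars.findFrom cs "<div".toList (pos : Int)).toNat = 2 ∨
                i - (PySem.Chars.findFrom cs "<div".toList (pos : Int)).toNat = 3 := by omega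
            rcases hcase with h | h | h <;> rw [h] at hval <;> simp only [List.getElem?_cons_succ,
              List.getElem?_cons_zero] at hval <;> exact no_tag_of_ne cs i _ hval (by decide)
        · -- the next tag is a closing '</div>'
          rw [replace_banner_jump, dif_neg hc, dif_neg ho]
          have hno4 : ∀ i : Nat, pos ≤ i →
              i < (PySem.Chars.findFrom cs "</div>".toList (pos : Int)).toNat →
              ¬ ("<div".toList <+: cs.drop i) := by
            by_cases h4 : PySem.Chars.findFrom cs "<div".toList (pos : Int) = -1
            · exact fun i ha _ => no_prefix_of_not_infix cs _ pos i ha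
                ((PySem.Chars.findFrom_natCast_eq_neg_one_iff cs _ pos hpos).mp h4)
            · obtain ⟨go1, go2, go3, go4⟩ := findFrom_facts cs "<div".toList pos hpos h4
              have hspo := (PySem.Chars.findFrom_natCast_spec cs "<div".toList pos hpos h4).1
              have hco : ¬ (PySem.Chars.findFrom cs "<div".toList (pos : Int) <
                  PySem.Chars.findFrom cs "</div>".toList (pos : Int)) := fun hx => ho ⟨h4, hx⟩
              exact fun i ha hb => go4 i ha (by omega)
          rw [scan_skip cs (PySem.Chars.findFrom cs "</div>".toList (pos : Int)).toNat pos
              (PySem.Chars.findFrom cs "</div>".toList (pos : Int)).toNat d (by omega) hc1 (by omega)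
              (fun i ha hb => ⟨hno4 i ha hb, hc4 i ha hb⟩)]
          obtain ⟨t, ht⟩ := hc3
          have hdrop : cs.drop (PySem.Chars.findFrom cs "</div>".toList (pos : Int)).toNat =
              '<' :: '/' :: 'd' :: 'i' :: 'v' :: '>' :: t := by rw [← ht]; rfl
          have h4c : ¬ ("<div".toList <+: cs.drop
              (PySem.Chars.findFrom cs "</div>".toList (pos : Int)).toNat) := by
            intro hp
            obtain ⟨u, hu⟩ := hp
            rw [hdrop] at hu
            simp at hu
          rw [replace_banner_scan, dif_pos (by omega),
              if_neg (fun hcx => h4c ((slice_eq_pat_iff cs _ _ 4 rfl).mp hcx)),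
              if_pos ((slice_eq_pat_iff cs _ _ 6 rfl).mpr ⟨t, ht⟩)]
          split_ifs with hd0
          · rfl
          · rw [scan_skip cs 5 ((PySem.Chars.findFrom cs "</div>".toList (pos : Int)).toNat + 1)
                ((PySem.Chars.findFrom cs "</div>".toList (pos : Int)).toNat + 6) (d - 1)
                (by omega) (by omega) (by omega) ?_]
            · exact ih ((PySem.Chars.findFrom cs "</div>".toList (pos : Int)).toNat + 6)
                (by omega) (d - 1) (by omega)
            · intro i ha hb
              have hval := char_at cs (PySem.Chars.findFrom cs "</div>".toList (pos : Int)).toNat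
                (i - (PySem.Chars.findFrom cs "</div>".toList (pos : Int)).toNat) _ hdrop
              rw [show (PySem.Chars.findFrom cs "</div>".toList (pos : Int)).toNat +
                  (i - (PySem.Chars.findFrom cs "</div>".toList (pos : Int)).toNat) = i by omega] at hval
              have hcase : i - (PySem.Chars.findFrom cs "</div>".toList (pos : Int)).toNat = 1 ∨
                  i - (PySem.Chars.findFrom cs "</div>".toList (pos : Int)).toNat = 2 ∨
                  i - (PySem.Chars.findFrom cs "</div>".toList (pos : Int)).toNat = 3 ∨
                  i - (PySem.Chars.findFrom cs "</div>".toList (pos : Int)).toNat = 4 ∨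
                  i - (PySem.Chars.findFrom cs "</div>".toList (pos : Int)).toNat = 5 := by omega
              rcases hcase with h | h | h | h | h <;> rw [h] at hval <;>
                simp only [List.getElem?_cons_succ, List.getElem?_cons_zero] at hval <;>
                exact no_tag_of_ne cs i _ hval (by decide)

-- ===== VERDICT (by name: the statement is the Claim_ definition above) =====
theorem replace_banner_spec : Claim_equal_replace_banner := by
  intro content banner_class replacement _
  unfold Spec_replace_banner
  simp only [replace_banner, replace_banner_alt]
  by_cases h : PySem.Chars.find content.toList
      ("<div class=\"".toList ++ banner_class.toList ++ "\">".toList) = -1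
  · rw [if_pos h, dif_pos h]
  · rw [if_neg h, dif_neg h,
        ← loop_eq content.toList content.toList.length
          (PySem.Chars.find content.toList
            ("<div class=\"".toList ++ banner_class.toList ++ "\">".toList)).toNat _ 0 (by omega)]
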